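-- pv_equiv track=rewrite | github.com/uclnlp/gntp | gntp/util.py | make_epoch_batches
-- ===== SOURCE A (Python) =====
-- def make_epoch_batches(size, batch_size, examples_per_epoch, drop_last=False):
--     start = 0
--     epoch = 1
--     res = []
--     while start < size:
--         end = start + batch_size
--         if end > epoch * examples_per_epoch:
--             end = epoch * examples_per_epoch
--             epoch += 1
--             if not drop_last and end != start:
--                 res.append((start, end))
--         else:
--             res.append((start, end))
--         start = end
--     return res
-- ===== SOURCE B (Python) =====
-- def make_epoch_batches(size, batch_size, examples_per_epoch, drop_last=False):
--     res = []
--     start = 0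
--     epoch = 1
--     while start < size:
--         hi = epoch * examples_per_epoch
--         full = (hi - start) // batch_size          # full batches fitting before this epoch's boundary
--         cut = -((start - size) // batch_size)      # = ceil((size - start) / batch_size): batches until start >= size
--         k = min(full, cut)
--         res.extend((start + i * batch_size, start + (i + 1) * batch_size) for i in range(k))
--         start += k * batch_size
--         if start >= size:
--             break
--         if not drop_last and start != hi:
--             res.append((start, hi))
--         start = hi
--         epoch += 1
--     return res
-- ===== Notes on version B (the rewrite author's own statement) =====
-- stated objective: alternative
-- what changed: A's single flat per-batch while-loop is replaced by a per-epoch outer loop that computes the number of full batches before the epoch boundary (and before the size cutoff) in closed form with floor division and emits them all at once, then handles the truncated boundary batch.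
import Mathlib
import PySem

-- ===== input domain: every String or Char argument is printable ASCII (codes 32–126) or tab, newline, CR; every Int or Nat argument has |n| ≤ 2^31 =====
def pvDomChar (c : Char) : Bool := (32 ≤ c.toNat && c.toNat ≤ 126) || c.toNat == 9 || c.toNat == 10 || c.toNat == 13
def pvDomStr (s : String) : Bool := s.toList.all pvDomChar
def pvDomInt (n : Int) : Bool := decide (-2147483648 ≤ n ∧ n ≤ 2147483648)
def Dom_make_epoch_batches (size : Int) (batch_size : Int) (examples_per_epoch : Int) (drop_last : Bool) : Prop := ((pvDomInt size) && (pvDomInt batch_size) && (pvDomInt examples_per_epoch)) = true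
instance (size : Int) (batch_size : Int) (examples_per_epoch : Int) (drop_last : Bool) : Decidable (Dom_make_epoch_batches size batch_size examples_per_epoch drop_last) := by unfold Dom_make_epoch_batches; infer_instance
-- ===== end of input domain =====

-- B replaces A's flat per-batch loop by a per-epoch pass computing the number of full batches
-- in closed form with floor division (objective: alternative decomposition, same output).

-- termination measure shared by both guarded loops (a fuel-like guard making the while-loops
-- total; on Pre_ the guard always holds, proved below)
def mebMu (size start epoch epe : Int) : Nat :=
  2 * (size - start).toNat + (if start = epoch * epe then 1 else 0)

-- ===== PORT A =====
-- literal port of A's while-loop; the dite guard only makes the recursion total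
def mebLoopA (size batch_size epe : Int) (drop_last : Bool) (start epoch : Int)
    (res : List (Int × Int)) : List (Int × Int) :=
  if start < size then
    let e := start + batch_size
    if e > epoch * epe then
      let e2 := epoch * epe
      let res' := if drop_last = false ∧ e2 ≠ start then res ++ [(start, e2)] else res
      if h : mebMu size e2 (epoch + 1) epe < mebMu size start epoch epe then
        mebLoopA size batch_size epe drop_last e2 (epoch + 1) res'
      else res'
    else
      if h : mebMu size e epoch epe < mebMu size start epoch epe then
        mebLoopA size batch_size epe drop_last e epoch (res ++ [(start, e)])
      else res ++ [(start, e)]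
  else res
termination_by mebMu size start epoch epe

def make_epoch_batches (size : Int) (batch_size : Int) (examples_per_epoch : Int) (drop_last : Bool) : List (Int × Int) :=
  mebLoopA size batch_size examples_per_epoch drop_last 0 1 []

-- ===== PORT B =====
-- literal port of Source B's outer loop; same totality guard
def mebLoopB (size batch_size epe : Int) (drop_last : Bool) (start epoch : Int)
    (res : List (Int × Int)) : List (Int × Int) :=
  if start < size then
    let hi := epoch * epe
    let full := PySem.Int.floordiv (hi - start) batch_size
    let cut := -(PySem.Int.floordiv (start - size) batch_size)
    let k := min full cut
    let res' := res ++ (List.range k.toNat).map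
      (fun (i : Nat) => (start + (i : Int) * batch_size, start + ((i : Int) + 1) * batch_size))
    let start' := start + k * batch_size
    if start' ≥ size then res'
    else
      let res'' := if drop_last = false ∧ start' ≠ hi then res' ++ [(start', hi)] else res'
      if h : mebMu size hi (epoch + 1) epe < mebMu size start epoch epe then
        mebLoopB size batch_size epe drop_last hi (epoch + 1) res''
      else res''
  else res
termination_by mebMu size start epoch epe

def make_epoch_batches_alt (size : Int) (batch_size : Int) (examples_per_epoch : Int) (drop_last : Bool) : List (Int × Int) :=
  mebLoopB size batch_size examples_per_epoch drop_last 0 1 []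

-- ===== PRECONDITION & SPEC =====
-- Pre_ excludes exactly the inputs on which A's while-loop never terminates (so A returns no
-- value): size > 0 together with batch_size ≤ 0 or examples_per_epoch ≤ 0.
def Pre_make_epoch_batches (size : Int) (batch_size : Int) (examples_per_epoch : Int) (drop_last : Bool) : Prop :=
  size ≤ 0 ∨ (1 ≤ batch_size ∧ 1 ≤ examples_per_epoch)
instance (size : Int) (batch_size : Int) (examples_per_epoch : Int) (drop_last : Bool) : Decidable (Pre_make_epoch_batches size batch_size examples_per_epoch drop_last) := by unfold Pre_make_epoch_batches; infer_instance
def pvWitness_make_epoch_batches : Int × Int × Int × Bool := (10, 3, 4, false)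

def Spec_make_epoch_batches (size : Int) (batch_size : Int) (examples_per_epoch : Int) (drop_last : Bool) (out : List (Int × Int)) : Prop := out = make_epoch_batches_alt size batch_size examples_per_epoch drop_last
instance (size : Int) (batch_size : Int) (examples_per_epoch : Int) (drop_last : Bool) (out : List (Int × Int)) : Decidable (Spec_make_epoch_batches size batch_size examples_per_epoch drop_last out) := by unfold Spec_make_epoch_batches; infer_instance

-- ===== CLAIM (what is proved, stated in full; the proofs are below) =====
def Claim_equal_make_epoch_batches : Prop := ∀ (size : Int) (batch_size : Int) (examples_per_epoch : Int) (drop_last : Bool), Dom_make_epoch_batches size batch_size examples_per_epoch drop_last → Pre_make_epoch_batches size batch_size examples_per_epoch drop_last → Spec_make_epoch_batches size batch_size examples_per_epoch drop_last (make_epoch_batches size batch_size examples_per_epoch drop_last)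

-- ===== LEMMAS AND PROOFS =====

lemma mebMu_dec_full (size bs start epoch epe : Int) (hbs : 1 ≤ bs) (hlt : start < size) :
    mebMu size (start + bs) epoch epe < mebMu size start epoch epe := by
  unfold mebMu; split_ifs <;> omega

lemma mebMu_dec_boundary (size start epoch epe : Int) (hepe : 1 ≤ epe)
    (hle : start ≤ epoch * epe) (hlt : start < size) :
    mebMu size (epoch * epe) (epoch + 1) epe < mebMu size start epoch epe := by
  have h1 : (epoch + 1) * epe = epoch * epe + epe := by ring
  unfold mebMu; split_ifs <;> omega

-- A's loop performs k consecutive full-batch steps (each inside the boundary and below size)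
lemma mebLoopA_unroll (size bs epe : Int) (dl : Bool) (hbs : 1 ≤ bs) :
    ∀ (k : Nat) (start epoch : Int) (res : List (Int × Int)),
      start + (k : Int) * bs ≤ epoch * epe →
      (∀ i : Nat, i < k → start + (i : Int) * bs < size) →
      mebLoopA size bs epe dl start epoch res =
        mebLoopA size bs epe dl (start + (k : Int) * bs) epoch
          (res ++ (List.range k).map
            (fun (i : Nat) => (start + (i : Int) * bs, start + ((i : Int) + 1) * bs))) := by
  intro k
  induction k with
  | zero => intro start epoch res _ _; norm_num
  | succ k ih =>
    intro start epoch res hbd hsz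
    have h0 : start < size := by
      have := hsz 0 (Nat.succ_pos k); simpa using this
    have hkb : (0 : Int) ≤ (k : Int) * bs :=
      mul_nonneg (by exact_mod_cast Nat.zero_le k) (by omega)
    have hle : start + bs ≤ epoch * epe := by
      have : ((k : Int) + 1) * bs = (k : Int) * bs + bs := by ring
      push_cast at hbd; omega
    rw [mebLoopA]
    simp only [if_pos h0]
    have hnot : ¬ (start + bs > epoch * epe) := by omega
    rw [if_neg hnot, dif_pos (mebMu_dec_full size bs start epoch epe hbs h0)]
    rw [ih (start + bs) epoch (res ++ [(start, start + bs)])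
      (by push_cast; push_cast at hbd; linarith [hbd])
      (by intro i hi
          have := hsz (i + 1) (by omega)
          push_cast at this ⊢; linarith [this])]
    congr 1
    · push_cast; ring
    · rw [List.range_succ_eq_map, List.map_cons, List.map_map, List.append_assoc]
      congr 1
      rw [List.singleton_append]
      congr 1
      · norm_num
      · apply List.map_congr_left
        intro i _
        simp only [Function.comp_apply]
        push_cast
        simp only [Prod.mk.injEq]
        constructor <;> ring
  termination_by k => k

lemma mebLoops_eq (size bs epe : Int) (dl : Bool) (hbs : 1 ≤ bs) (hepe : 1 ≤ epe) :
    ∀ (n : Nat) (start epoch : Int) (res : List (Int × Int)),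
      mebMu size start epoch epe = n → start ≤ epoch * epe →
      mebLoopA size bs epe dl start epoch res = mebLoopB size bs epe dl start epoch res := by
  intro n
  induction n using Nat.strong_induction_on with
  | _ n ih =>
    intro start epoch res hn hinv
    by_cases hs : start < size
    · -- set up B's arithmetic
      have hbs0 : (0 : Int) < bs := by omega
      set hi := epoch * epe with hhi
      set full := PySem.Int.floordiv (hi - start) bs with hfull
      set cut := -(PySem.Int.floordiv (start - size) bs) with hcut
      set k := min full cut with hk
      have hfull_le : full * bs ≤ hi - start := by
        have := (PySem.Int.le_floordiv_iff_mul_le (a := hi - start) (b := bs) (q := full) hbs0).mp le_rfl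
        exact this
      have hfull_lt : hi - start < (full + 1) * bs := by
        have := (PySem.Int.floordiv_lt_iff_lt_mul (a := hi - start) (b := bs) (q := full + 1) hbs0).mp (by omega)
        exact this
      have hcut_spec : (cut - 1) * bs < size - start ∧ size - start ≤ cut * bs := by
        have := (PySem.Int.neg_floordiv_neg_eq_iff_of_pos (a := size - start) (b := bs) (q := cut) hbs0).mp
        simp only [neg_sub] at this
        exact this rfl
      have hfull0 : 0 ≤ full := by
        by_contra h
        have h2 : (full + 1) * bs ≤ 0 := by
          have := mul_le_mul_of_nonneg_right (show full + 1 ≤ 0 by omega) (show (0:Int) ≤ bs by omega)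
          simpa using this
        omega
      have hcut1 : 1 ≤ cut := by
        by_contra h
        have h2 : cut * bs ≤ 0 := by
          have := mul_le_mul_of_nonneg_right (show cut ≤ 0 by omega) (show (0:Int) ≤ bs by omega)
          simpa using this
        omega
      have hk0 : 0 ≤ k := le_min hfull0 (by omega)
      have hkc : ((k.toNat : Int)) = k := Int.toNat_of_nonneg hk0
      have hkb : start + (k.toNat : Int) * bs ≤ epoch * epe := by
        have h1 : k ≤ full := min_le_left _ _
        have : k * bs ≤ full * bs := mul_le_mul_of_nonneg_right h1 (by omega)
        rw [hkc]; omega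
      have hksz : ∀ i : Nat, i < k.toNat → start + (i : Int) * bs < size := by
        intro i hi2
        have h1 : (i : Int) ≤ cut - 1 := by
          have : (i : Int) < k := by omega
          have h2 : k ≤ cut := min_le_right _ _
          omega
        have : (i : Int) * bs ≤ (cut - 1) * bs := mul_le_mul_of_nonneg_right h1 (by omega)
        omega
      -- unroll A through the k full batches
      rw [mebLoopA_unroll size bs epe dl hbs k.toNat start epoch res hkb hksz]
      -- unfold B one step
      rw [mebLoopB]
      simp only [if_pos hs]
      rw [← hhi, ← hfull, ← hcut, ← hk]
      set start' := start + k * bs with hstart'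
      set res' := res ++ (List.range k.toNat).map
        (fun (i : Nat) => (start + (i : Int) * bs, start + ((i : Int) + 1) * bs)) with hres'
      have hstarteq : start + (k.toNat : Int) * bs = start' := by rw [hkc]
      rw [hstarteq]
      by_cases hdone : start' ≥ size
      · rw [if_pos hdone, mebLoopA, if_neg (by omega)]
      · rw [if_neg hdone]
        -- start' < size forces k = full, hence a boundary step in A
        have hklt : k < cut := by
          by_contra h
          have hkcut : k = cut := le_antisymm (min_le_right _ _) (by omega)
          have : size - start ≤ k * bs := by rw [hkcut]; exact hcut_spec.2
          omega
        have hkfull : k = full := by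
          rcases min_cases full cut with ⟨h1, _⟩ | ⟨h1, h2⟩
          · exact h1
          · omega
        have hbound : start' + bs > hi := by
          have : (full + 1) * bs = full * bs + bs := by ring
          rw [hstart', hkfull]; omega
        have hle' : start' ≤ hi := by omega
        rw [mebLoopA]
        simp only [if_pos (show start' < size by omega)]
        rw [if_pos hbound]
        rw [dif_pos (mebMu_dec_boundary size start' epoch epe hepe hle' (by omega))]
        have hcond : (dl = false ∧ epoch * epe ≠ start') ↔ (dl = false ∧ start' ≠ hi) := by
          rw [hhi]; constructor <;> exact fun ⟨a, b⟩ => ⟨a, b.symm⟩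
        rw [dif_pos (mebMu_dec_boundary size start epoch epe hepe hinv hs)]
        have hmu : mebMu size hi (epoch + 1) epe < n := by
          rw [← hn, hhi]; exact mebMu_dec_boundary size start epoch epe hepe hinv hs
        have hinv' : hi ≤ (epoch + 1) * epe := by
          have : (epoch + 1) * epe = epoch * epe + epe := by ring
          omega
        rw [ih _ hmu hi (epoch + 1) _ rfl hinv']
        congr 1
        rw [if_congr hcond rfl rfl]
    · rw [mebLoopA, mebLoopB, if_neg hs, if_neg hs]

-- ===== VERDICT (by name: the statement is the Claim_ definition above) =====
theorem make_epoch_batches_spec : Claim_equal_make_epoch_batches := by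
  intro size bs epe dl _ hpre
  unfold Spec_make_epoch_batches make_epoch_batches make_epoch_batches_alt
  rcases hpre with h | ⟨hbs, hepe⟩
  · rw [mebLoopA, mebLoopB, if_neg (by omega), if_neg (by omega)]
  · exact mebLoops_eq size bs epe dl hbs hepe _ 0 1 [] rfl (by omega)
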